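-- pv_equiv track=rewrite | github.com/mala-project/mala | mala/descriptors/acelib/coupling_utils.py | get_mapped
-- ===== SOURCE A (Python) =====
-- from collections import Counter
--
-- def get_mapped(nin, lin):
--     """
--     Sort n and l multisets by frequency of occurence of elements in nin and lin.
--
--     For nin, elements of nin are ordered according to their frequency, and a new index is assigned to elements of nin based on their frequency of occurence. The map between these two is saved.
--
--     For lin, elements of lin are ordered according to their frequency, and a new index is assigned to elements of lin based on their frequency of occurence. The map between these two is saved.
--
--     This function is used to avoid redundant enumeration for radial and angular function index multisets with the same frequency partitions as others.
--
--     For example n=(1,1,2,2), l=(1,1,3,5) uses the same frequency partition as n=(2,2,3,3), l=(3,3,4,6). This function makes sure these two cases are handledwith the same frequency partition.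
--
--     For example, nin = [2,3,3,4] -> mappedn = [0,0,1,2], mprev_n = {0:3,1:2,2:4} and lin = [1,1,1,3] -> mappedl = [0,0,0,1], mprev = {0:1,1:3}.
--
--
--     Parameters
--     ----------
--     nin : List
--         radial indices to resort according to frequency and return the mapping to do so
--
--     lin : List
--         angular indices to resort according to frequency and return the mapping to do so
--
--     Returns
--     -------
--     mappedn : tuple
--         frequency-sorted indices for nin
--     """
--     N = len(lin)
--     uniques = list(set(lin))
--     tmp = list(lin).copy()
--     tmp.sort(key=Counter(lin).get, reverse=True)
--     uniques.sort()
--     uniques.sort(key=Counter(tmp).get, reverse=True)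
--     mp = {uniques[i]: i for i in range(len(uniques))}
--     mprev = {i: uniques[i] for i in range(len(uniques))}
--     mappedl = [mp[t] for t in tmp]
--
--     unique_ns = list(set(nin))
--     tmpn = list(nin).copy()
--     tmpn.sort(key=Counter(nin).get, reverse=True)
--     unique_ns.sort()
--     unique_ns.sort(key=Counter(nin).get, reverse=True)
--     mp_n = {unique_ns[i]: i for i in range(len(unique_ns))}
--     mprev_n = {i: unique_ns[i] for i in range(len(unique_ns))}
--     mappedn = [mp_n[t] for t in tmpn]
--     mappedn = tuple(mappedn)
--     mappedl = tuple(mappedl)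
--     return mappedn, mappedl, mprev_n, mprev
-- ===== SOURCE B (Python) =====
-- from collections import Counter
--
--
-- def _freq_map(x):
--     """Bucket-by-frequency: no sort of the full list, only of the small
--     distinct-value and distinct-count sets."""
--     counts = Counter(x)
--     descending = sorted(set(counts.values()), reverse=True)
--     base = sorted(counts)
--     order = []
--     for c in descending:
--         order.extend(v for v in base if counts[v] == c)
--     mp = {v: i for i, v in enumerate(order)}
--     mprev = {i: v for i, v in enumerate(order)}
--     mapped = []
--     for c in descending:
--         mapped.extend(mp[v] for v in x if counts[v] == c)
--     return tuple(mapped), mprev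
--
--
-- def get_mapped(nin, lin):
--     mappedn, mprev_n = _freq_map(nin)
--     mappedl, mprev = _freq_map(lin)
--     return mappedn, mappedl, mprev_n, mprev
-- ===== Notes on version B (the rewrite author's own statement) =====
-- stated objective: alternative
-- what changed: Instead of A's repeated stable sorts of the full lists and of the uniques, B groups elements into frequency buckets and concatenates the buckets in decreasing count order, sorting only the small distinct-value and distinct-count sets.
import Mathlib
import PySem

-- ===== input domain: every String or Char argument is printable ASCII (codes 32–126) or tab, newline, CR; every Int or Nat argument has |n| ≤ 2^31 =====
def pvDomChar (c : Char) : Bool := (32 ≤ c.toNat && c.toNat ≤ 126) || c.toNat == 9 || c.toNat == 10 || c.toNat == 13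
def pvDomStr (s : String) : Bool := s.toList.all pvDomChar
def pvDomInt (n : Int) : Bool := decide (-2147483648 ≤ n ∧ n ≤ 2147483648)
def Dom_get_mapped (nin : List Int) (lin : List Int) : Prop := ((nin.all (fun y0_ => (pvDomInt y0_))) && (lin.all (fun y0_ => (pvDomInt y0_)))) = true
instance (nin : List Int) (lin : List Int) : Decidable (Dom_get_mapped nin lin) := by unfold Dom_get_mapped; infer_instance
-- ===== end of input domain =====

-- B replaces A's repeated stable sorts by bucket-grouping over the distinct count values (objective: alternative).

-- ===== PORT A =====
-- A's `Counter(..).get` keys are always present on the values it is applied to, so it is `getD _ 0`;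
-- likewise `mp[t]` / `mp_n[t]` never raise (t always a key), ported as `getD t 0`.
def get_mapped (nin : List Int) (lin : List Int) : List Int × List Int × (List (Int × Int)) × (List (Int × Int)) :=
  let _N := PySem.List.len lin
  let uniques : List Int := PySem.Set.ofList lin
  let tmp := lin
  let tmp := PySem.List.sorted tmp (fun v => (PySem.Dict.counter lin).getD v 0) true
  let uniques := PySem.List.sorted uniques (fun v => v) false
  let uniques := PySem.List.sorted uniques (fun v => (PySem.Dict.counter tmp).getD v 0) true
  let mp : PySem.Dict Int Int := (PySem.List.pyRange 0 (PySem.List.len uniques)).foldl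
      (fun d i => d.insert (PySem.List.pyGetD uniques i 0) i) PySem.Dict.empty
  let mprev : PySem.Dict Int Int := (PySem.List.pyRange 0 (PySem.List.len uniques)).foldl
      (fun d i => d.insert i (PySem.List.pyGetD uniques i 0)) PySem.Dict.empty
  let mappedl := tmp.map (fun t => mp.getD t 0)
  let unique_ns : List Int := PySem.Set.ofList nin
  let tmpn := nin
  let tmpn := PySem.List.sorted tmpn (fun v => (PySem.Dict.counter nin).getD v 0) true
  let unique_ns := PySem.List.sorted unique_ns (fun v => v) false
  let unique_ns := PySem.List.sorted unique_ns (fun v => (PySem.Dict.counter nin).getD v 0) true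
  let mp_n : PySem.Dict Int Int := (PySem.List.pyRange 0 (PySem.List.len unique_ns)).foldl
      (fun d i => d.insert (PySem.List.pyGetD unique_ns i 0) i) PySem.Dict.empty
  let mprev_n : PySem.Dict Int Int := (PySem.List.pyRange 0 (PySem.List.len unique_ns)).foldl
      (fun d i => d.insert i (PySem.List.pyGetD unique_ns i 0)) PySem.Dict.empty
  let mappedn := tmpn.map (fun t => mp_n.getD t 0)
  (mappedn, mappedl, mprev_n.items, mprev.items)

-- ===== PORT B =====
def pvFreqMap (x : List Int) : List Int × List (Int × Int) :=
  let counts := PySem.Dict.counter x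
  let descending := PySem.List.sorted (PySem.Set.ofList counts.values) (fun c => c) true
  let base := PySem.List.sorted counts.keys (fun v => v) false
  let order := descending.foldl (fun acc c => acc ++ base.filter (fun v => counts.getD v 0 == c)) []
  let mp : PySem.Dict Int Int := (PySem.List.enumerate order).foldl
      (fun d p => d.insert p.2 p.1) PySem.Dict.empty
  let mprev : PySem.Dict Int Int := (PySem.List.enumerate order).foldl
      (fun d p => d.insert p.1 p.2) PySem.Dict.empty
  let mapped := descending.foldl
      (fun acc c => acc ++ (x.filter (fun v => counts.getD v 0 == c)).map (fun v => mp.getD v 0)) []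
  (mapped, mprev.items)

def get_mapped_alt (nin : List Int) (lin : List Int) : List Int × List Int × (List (Int × Int)) × (List (Int × Int)) :=
  let pn := pvFreqMap nin
  let pl := pvFreqMap lin
  (pn.1, pl.1, pn.2, pl.2)

-- ===== PRECONDITION & SPEC =====
def Spec_get_mapped (nin : List Int) (lin : List Int) (out : List Int × List Int × (List (Int × Int)) × (List (Int × Int))) : Prop := out = get_mapped_alt nin lin
instance (nin : List Int) (lin : List Int) (out : List Int × List Int × (List (Int × Int)) × (List (Int × Int))) : Decidable (Spec_get_mapped nin lin out) := by unfold Spec_get_mapped; infer_instance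

-- ===== CLAIM (what is proved, stated in full; the proofs are below) =====
def Claim_equal_get_mapped : Prop := ∀ (nin : List Int) (lin : List Int), Dom_get_mapped nin lin → Spec_get_mapped nin lin (get_mapped nin lin)

-- ===== LEMMAS AND PROOFS =====

-- insertBy skips a prefix none of whose elements `before` wants to pass
lemma pv_insertBy_append (before : Int → Int → Bool) (x : Int) (s t : List Int)
    (hs : ∀ y ∈ s, before x y = false) :
    PySem.List.insertBy before x (s ++ t) = s ++ PySem.List.insertBy before x t := by
  induction s with
  | nil => simp
  | cons y ys ih =>
    have hy : before x y = false := hs y (by simp)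
    simp only [List.cons_append, PySem.List.insertBy, hy]
    simp [ih (fun z hz => hs z (by simp [hz]))]

-- insertBy puts x in front when it passes everything
lemma pv_insertBy_front (before : Int → Int → Bool) (x : Int) (ys : List Int)
    (h : ∀ y ∈ ys, before x y = true) :
    PySem.List.insertBy before x ys = x :: ys := by
  cases ys with
  | nil => rfl
  | cons y ys => simp [PySem.List.insertBy, h y (by simp)]

-- inserting one element into the bucket decomposition lands at the end of its bucket
lemma pv_insertBy_flatMap (k : Int → Int) (a : Int) (zs ds : List Int)
    (hd : ds.Pairwise (fun p q => q < p)) (ha : k a ∈ ds) :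
    PySem.List.insertBy (fun p q => decide (k q < k p)) a
        (ds.flatMap (fun c => zs.filter (fun v => k v == c)))
      = ds.flatMap (fun c => (zs ++ [a]).filter (fun v => k v == c)) := by
  induction ds with
  | nil => simp at ha
  | cons c ds ih =>
    have hlt : ∀ c' ∈ ds, c' < c := fun c' hc' => List.rel_of_pairwise_cons hd hc'
    have hd' := hd.of_cons
    simp only [List.flatMap_cons]
    by_cases hac : k a = c
    · rw [pv_insertBy_append _ _ _ _
        (by intro y hy; simp only [List.mem_filter, beq_iff_eq] at hy
            simp [hy.2, hac])]
      rw [pv_insertBy_front _ _ _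
        (by intro y hy
            simp only [List.mem_flatMap, List.mem_filter, beq_iff_eq] at hy
            obtain ⟨c', hc', -, hy2⟩ := hy
            simp [hy2, hac, hlt c' hc'])]
      have h1 : (zs ++ [a]).filter (fun v => k v == c) = zs.filter (fun v => k v == c) ++ [a] := by
        simp [List.filter_append, hac]
      have h2 : ds.flatMap (fun c' => (zs ++ [a]).filter (fun v => k v == c')) =
          ds.flatMap (fun c' => zs.filter (fun v => k v == c')) := by
        apply List.flatMap_congr
        intro c' hc'
        have : ¬ k a = c' := by have := hlt c' hc'; omega
        simp [List.filter_append, this]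
      rw [h1, h2]
      simp
    · have ha' : k a ∈ ds := by rcases List.mem_cons.1 ha with h | h; exact absurd h hac; exact h
      have hka : k a < c := hlt _ ha'
      rw [pv_insertBy_append _ _ _ _
        (by intro y hy; simp only [List.mem_filter, beq_iff_eq] at hy
            simp [hy.2]; omega)]
      rw [ih hd' ha']
      have h1 : (zs ++ [a]).filter (fun v => k v == c) = zs.filter (fun v => k v == c) := by
        simp [List.filter_append, hac]
      rw [h1]

-- the stable reverse sort by k is the concatenation of the k-buckets, in strictly decreasing bucket order
lemma pv_sorted_rev_eq_flatMap (k : Int → Int) (zs ds : List Int)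
    (hd : ds.Pairwise (fun p q => q < p)) (hcov : ∀ v ∈ zs, k v ∈ ds) :
    PySem.List.sorted zs k true = ds.flatMap (fun c => zs.filter (fun v => k v == c)) := by
  induction zs using List.reverseRecOn with
  | nil => simp [PySem.List.sorted]
  | append_singleton zs a ih =>
    rw [PySem.List.sorted_rev_eq_foldl_insertBy, List.foldl_append]
    simp only [List.foldl_cons, List.foldl_nil]
    rw [← PySem.List.sorted_rev_eq_foldl_insertBy,
        ih (fun v hv => hcov v (by simp [hv])),
        pv_insertBy_flatMap k a zs ds hd (hcov a (by simp))]

-- the descending distinct count values are strictly decreasing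
lemma pv_desc_strict (x : List Int) :
    (PySem.List.sorted (PySem.Set.ofList (PySem.Dict.counter x).values) (fun c => c) true).Pairwise
      (fun p q => q < p) := by
  have hle := PySem.List.sorted_pairwise_rev (PySem.Set.ofList (PySem.Dict.counter x).values) (fun c => c)
  have hnd : (PySem.List.sorted (PySem.Set.ofList (PySem.Dict.counter x).values) (fun c => c) true).Nodup :=
    (PySem.List.sorted_perm _ _ _).nodup_iff.2 (PySem.Set.nodup_ofList _)
  exact (hle.and hnd).imp (fun h => lt_of_le_of_ne h.1 (Ne.symm h.2))

-- every element's count occurs among the descending count values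
lemma pv_desc_cover (x : List Int) (v : Int) (hv : v ∈ x) :
    ((List.count v x : Int)) ∈
      PySem.List.sorted (PySem.Set.ofList (PySem.Dict.counter x).values) (fun c => c) true := by
  rw [PySem.List.mem_sorted, PySem.Set.mem_ofList]
  unfold PySem.Dict.values
  rw [PySem.Dict.items_counter]
  simp only [List.map_map, List.mem_map]
  exact ⟨v, (PySem.Set.mem_ofList _ _).2 hv, rfl⟩

-- the range/getD dict comprehension is the enumerate fold (key := element)
lemma pv_dict_range_enum₁ (u : List Int) :
    (PySem.List.pyRange 0 (PySem.List.len u)).foldl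
        (fun d i => d.insert (PySem.List.pyGetD u i 0) i) PySem.Dict.empty
      = (PySem.List.enumerate u).foldl (fun d p => d.insert p.2 p.1)
          (PySem.Dict.empty : PySem.Dict Int Int) := by
  rw [PySem.List.enumerate_eq_map_pyRange u 0, List.foldl_map]

-- the range/getD dict comprehension is the enumerate fold (key := index)
lemma pv_dict_range_enum₂ (u : List Int) :
    (PySem.List.pyRange 0 (PySem.List.len u)).foldl
        (fun d i => d.insert i (PySem.List.pyGetD u i 0)) PySem.Dict.empty
      = (PySem.List.enumerate u).foldl (fun d p => d.insert p.1 p.2)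
          (PySem.Dict.empty : PySem.Dict Int Int) := by
  rw [PySem.List.enumerate_eq_map_pyRange u 0, List.foldl_map]

-- one side of A (its two sorts expressed with the plain count key) equals pvFreqMap
lemma pv_side (x : List Int) :
    ((PySem.List.sorted x (fun v => ((List.count v x : Int))) true).map
        (fun t => ((PySem.List.pyRange 0 (PySem.List.len (PySem.List.sorted (PySem.List.sorted (PySem.Set.ofList x) (fun v => v) false) (fun v => ((List.count v x : Int))) true))).foldl
          (fun d i => d.insert (PySem.List.pyGetD (PySem.List.sorted (PySem.List.sorted (PySem.Set.ofList x) (fun v => v) false) (fun v => ((List.count v x : Int))) true) i 0) i) PySem.Dict.empty).getD t 0),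
      ((PySem.List.pyRange 0 (PySem.List.len (PySem.List.sorted (PySem.List.sorted (PySem.Set.ofList x) (fun v => v) false) (fun v => ((List.count v x : Int))) true))).foldl
          (fun d i => d.insert i (PySem.List.pyGetD (PySem.List.sorted (PySem.List.sorted (PySem.Set.ofList x) (fun v => v) false) (fun v => ((List.count v x : Int))) true) i 0)) PySem.Dict.empty).items)
    = pvFreqMap x := by
  unfold pvFreqMap
  simp only [PySem.Dict.getD_counter, PySem.Dict.keys_counter,
    PySem.List.foldl_append_eq_flatMap, List.nil_append,
    pv_dict_range_enum₁, pv_dict_range_enum₂]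
  rw [pv_sorted_rev_eq_flatMap (fun v => ((List.count v x : Int))) x _ (pv_desc_strict x)
        (fun v hv => pv_desc_cover x v hv),
      pv_sorted_rev_eq_flatMap (fun v => ((List.count v x : Int)))
        (PySem.List.sorted (PySem.Set.ofList x) (fun v => v) false) _ (pv_desc_strict x)
        (fun v hv => pv_desc_cover x v (by
          rw [PySem.List.mem_sorted, PySem.Set.mem_ofList] at hv; exact hv))]
  rw [List.map_flatMap]

-- ===== VERDICT (by name: the statement is the Claim_ definition above) =====
theorem get_mapped_spec : Claim_equal_get_mapped := by
  intro nin lin _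
  show get_mapped nin lin = get_mapped_alt nin lin
  simp only [get_mapped, get_mapped_alt]
  simp only [PySem.Dict.getD_counter]
  simp only [(PySem.List.sorted_perm lin (fun v => ((List.count v lin : Int))) true).count_eq]
  rw [← pv_side nin, ← pv_side lin]
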